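-- pv_equiv track=rewrite | github.com/papibe/advent-of-code-2024 | python/day05/part2.py | solve
-- ===== SOURCE A (Python) =====
-- from typing import Dict, List, Set, Tuple
--
-- Rules = Dict[str, Set[str]]
--
-- Update = List[str]
--
-- def get_unorder(update: Update, rules: Rules) -> Tuple[int, int, bool]:
--     """check if a printer update is correctly ordered"""
--     for i in range(len(update) - 1, -1, -1):
--         for j in range(i - 1, -1, -1):
--             if update[i] in rules and update[j] in rules[update[i]]:
--                 return i, j, False
--     return 0, 0, True
--
-- def solve(rules: Rules, updates: List[List[str]]) -> int:
--     middle_sum: int = 0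
--     for update in updates:
--         i, j, is_good = get_unorder(update, rules)
--         if not is_good:
--             while not is_good:
--                 update[i], update[j] = update[j], update[i]
--                 i, j, is_good = get_unorder(update, rules)
--
--             middle_sum += int(update[len(update) // 2])
--
--     return middle_sum
-- ===== SOURCE B (Python) =====
-- def solve(rules, updates):
--     # Counting-based reordering: no swap loop and no sort -- the middle page of the
--     # fixed update is the unique page with exactly n - 1 - n//2 pages due after it.
--     # (Unlike A, this does not mutate the update lists in place.)
--     middle_sum = 0
--     for update in updates:
--         n = len(update)
--         ordered = all(
--             update[j] not in rules.get(update[i], ())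
--             for i in range(n) for j in range(i)
--         )
--         if not ordered:
--             target = n - 1 - n // 2
--             for x in update:
--                 after = sum(1 for y in update if y != x and x in rules and y in rules[x])
--                 if after == target:
--                     middle_sum += int(x)
--                     break
--     return middle_sum
-- ===== Notes on version B (the rewrite author's own statement) =====
-- stated objective: alternative
-- what changed: Replaces A's repeated swap-and-rescan fixpoint loop with a direct counting selection: an update's fixed middle page is the unique page with exactly n-1-n//2 pages required after it, so B finds it with one count pass and never reorders anything.
-- outside the precondition, e.g. on solve({'2': ['1']}, [['1', '3', '2']]): A returns 3, B returns 2
import Mathlib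
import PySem

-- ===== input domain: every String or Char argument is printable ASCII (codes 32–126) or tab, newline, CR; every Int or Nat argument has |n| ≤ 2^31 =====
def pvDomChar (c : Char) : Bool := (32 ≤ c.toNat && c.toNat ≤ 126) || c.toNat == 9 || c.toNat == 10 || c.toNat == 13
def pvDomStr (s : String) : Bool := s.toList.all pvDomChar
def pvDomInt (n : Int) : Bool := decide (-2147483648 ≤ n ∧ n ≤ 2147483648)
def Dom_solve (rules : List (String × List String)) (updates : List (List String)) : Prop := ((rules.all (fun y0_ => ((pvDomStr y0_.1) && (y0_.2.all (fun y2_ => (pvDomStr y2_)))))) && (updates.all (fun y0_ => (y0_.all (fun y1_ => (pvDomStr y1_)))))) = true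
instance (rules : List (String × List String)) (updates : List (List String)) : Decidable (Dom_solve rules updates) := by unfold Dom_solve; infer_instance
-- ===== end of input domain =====

-- B replaces A's swap-and-rescan fixpoint loop by a one-pass counting selection of the
-- middle page (objective: alternative algorithm). Note: Python A mutates each update list
-- in place while reordering; B does not — the equivalence proved here is about the return value.

-- ===== PORT A =====

-- `update[i] in rules and update[j] in rules[update[i]]` (key present and set member)
def pvRelA (rules : List (String × List String)) (x y : String) : Bool :=
  match (PySem.Dict.mk rules).get? x with
  | some s => List.contains s y
  | none => false

-- inner loop `for j in range(i - 1, -1, -1)`: argument k counts down, current j = k - 1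
def pvGuJ (rules : List (String × List String)) (u : List String) (i : Nat) : Nat → Option Nat
  | 0 => none
  | k + 1 => if pvRelA rules (u.getD i "") (u.getD k "") then some k else pvGuJ rules u i k

-- outer loop `for i in range(len(update) - 1, -1, -1)`: argument k counts down, current i = k - 1
def pvGuI (rules : List (String × List String)) (u : List String) : Nat → Option (Nat × Nat)
  | 0 => none
  | k + 1 =>
    match pvGuJ rules u k k with
    | some j => some (k, j)
    | none => pvGuI rules u k

-- get_unorder: Python's `(i, j, False)` is `some (i, j)`; `(0, 0, True)` is `none`
-- (the 0, 0 of the True case are unused sentinels in A).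
def getUnorder (update : List String) (rules : List (String × List String)) : Option (Nat × Nat) :=
  pvGuI rules update update.length

-- inversion count of an update: termination measure for A's while loop (guard only; it
-- strictly decreases at every swap on inputs satisfying Pre_solve)
def pvInv (rules : List (String × List String)) : List String → Nat
  | [] => 0
  | a :: t => t.countP (fun b => pvRelA rules b a) + pvInv rules t

-- `update[i], update[j] = update[j], update[i]` (both reads happen before both writes)
def pvSwap (u : List String) (i j : Nat) : List String :=
  (u.set i (u.getD j "")).set j (u.getD i "")

-- the `while not is_good:` loop, entered with the violation (i, j) already in hand
def pvFixLoop (rules : List (String × List String)) (u : List String) (i j : Nat) : List String :=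
  match getUnorder (pvSwap u i j) rules with
  | none => pvSwap u i j
  | some (i', j') =>
    if _h : pvInv rules (pvSwap u i j) < pvInv rules u then pvFixLoop rules (pvSwap u i j) i' j'
    else pvSwap u i j
termination_by pvInv rules u
decreasing_by exact _h

-- one iteration of A's `for update in updates:` body
def pvStepA (rules : List (String × List String)) (middle_sum : Int) (update : List String) : Int :=
  match getUnorder update rules with
  | none => middle_sum
  | some (i, j) =>
    let fixed := pvFixLoop rules update i j
    -- int(update[len(update) // 2]); int() cannot fail inside Pre_solve, so the getD 0 is unreachable there
    middle_sum + (PySem.Int.ofStr? (fixed.getD (fixed.length / 2) "")).getD 0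

def solve (rules : List (String × List String)) (updates : List (List String)) : Int :=
  updates.foldl (pvStepA rules) 0

-- ===== PORT B =====

-- one iteration of B's `for update in updates:` body
def pvStepB (rules : List (String × List String)) (middle_sum : Int) (update : List String) : Int :=
  -- ordered = all(update[j] not in rules.get(update[i], ()) for i in range(n) for j in range(i))
  if ((List.range update.length).all fun i => (List.range i).all fun j =>
      !(((PySem.Dict.mk rules).getD (update.getD i "") []).contains (update.getD j ""))) then
    middle_sum
  else
    -- for x in update: after = sum(1 for y ...); first x with after == target = n - 1 - n // 2
    -- (n ≥ 2 whenever this branch runs, so the Nat subtraction is exact)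
    match update.find? (fun x =>
      update.countP (fun y => decide (y ≠ x) &&
        (match (PySem.Dict.mk rules).get? x with
         | some s => List.contains s y
         | none => false)) == update.length - 1 - update.length / 2) with
    | some x => middle_sum + (PySem.Int.ofStr? x).getD 0
    | none => middle_sum

def solve_alt (rules : List (String × List String)) (updates : List (List String)) : Int :=
  updates.foldl (pvStepB rules) 0

-- ===== PRECONDITION & SPEC =====

-- the page-ordering relation the rules dict encodes: `pvRel rules x y` = "y must come after x"
def pvRel (rules : List (String × List String)) (x y : String) : Bool :=
  match (PySem.Dict.mk rules).get? x with
  | some s => List.contains s y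
  | none => false

-- the update is already correctly ordered (no pair violates a rule)
def pvOrderedUpd (rules : List (String × List String)) (u : List String) : Prop :=
  List.Pairwise (fun x y => pvRel rules y x = false) u

-- the rules restrict to a strict linear order on the update's (distinct, int-parseable) pages
def pvLinearUpd (rules : List (String × List String)) (u : List String) : Prop :=
  u.Nodup ∧ (∀ x ∈ u, (PySem.Int.ofStr? x).isSome = true) ∧
  (∀ x ∈ u, pvRel rules x x = false) ∧
  (∀ x ∈ u, ∀ y ∈ u, x ≠ y → pvRel rules x y = !pvRel rules y x) ∧
  (∀ x ∈ u, ∀ y ∈ u, ∀ z ∈ u, pvRel rules x y = true → pvRel rules y z = true → pvRel rules x z = true)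

-- Pre_ excludes (a) out-of-order updates whose pages the rules do not linearly order — there A's
-- swap schedule diverges or settles on an arbitrary schedule-dependent order no one would specify —
-- and (b) out-of-order updates with a non-integer page, where int() raises ValueError.
def Pre_solve (rules : List (String × List String)) (updates : List (List String)) : Prop :=
  ∀ u ∈ updates, pvOrderedUpd rules u ∨ pvLinearUpd rules u

instance (rules : List (String × List String)) (updates : List (List String)) : Decidable (Pre_solve rules updates) := by
  unfold Pre_solve pvOrderedUpd pvLinearUpd; infer_instance

def pvWitness_solve : (List (String × List String)) × List (List String) :=
  ([("2", ["1"])], [["1", "2"]])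

def Spec_solve (rules : List (String × List String)) (updates : List (List String)) (out : Int) : Prop := out = solve_alt rules updates
instance (rules : List (String × List String)) (updates : List (List String)) (out : Int) : Decidable (Spec_solve rules updates out) := by unfold Spec_solve; infer_instance

-- ===== CLAIM (what is proved, stated in full; the proofs are below) =====
def Claim_equal_solve : Prop := ∀ (rules : List (String × List String)) (updates : List (List String)), Dom_solve rules updates → Pre_solve rules updates → Spec_solve rules updates (solve rules updates)

-- ===== LEMMAS AND PROOFS =====

theorem pvRelA_eq (rules : List (String × List String)) (x y : String) :
    pvRelA rules x y = pvRel rules x y := rfl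

theorem pvRelB_eq (rules : List (String × List String)) (x y : String) :
    (((PySem.Dict.mk rules).getD x []).contains y) = pvRel rules x y := by
  rw [PySem.Dict.getD_eq_get?_getD]
  unfold pvRel
  cases h : (PySem.Dict.mk rules).get? x <;> simp

theorem pvGuJ_none (rules : List (String × List String)) (u : List String) (i : Nat) :
    ∀ k, pvGuJ rules u i k = none ↔ ∀ j, j < k → pvRel rules (u.getD i "") (u.getD j "") = false := by
  intro k
  induction k with
  | zero => exact ⟨fun _ j hj => absurd hj (Nat.not_lt_zero j), fun _ => rfl⟩
  | succ k ih =>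
    unfold pvGuJ
    rw [pvRelA_eq]
    by_cases h : pvRel rules (u.getD i "") (u.getD k "") = true
    · rw [if_pos h]
      constructor
      · intro hc; exact (Option.some_ne_none _ hc).elim
      · intro hall
        have hk := hall k (Nat.lt_succ_self k)
        rw [hk] at h; exact (Bool.false_ne_true h).elim
    · have h' : pvRel rules (u.getD i "") (u.getD k "") = false := by
        revert h; cases pvRel rules (u.getD i "") (u.getD k "") <;> simp
      rw [if_neg h, ih]
      constructor
      · intro hall j hj
        rcases Nat.lt_succ_iff_lt_or_eq.mp hj with h1 | rfl
        · exact hall j h1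
        · exact h'
      · intro hall j hj; exact hall j (Nat.lt_succ_of_lt hj)

theorem pvGuJ_some (rules : List (String × List String)) (u : List String) (i : Nat) :
    ∀ k j, pvGuJ rules u i k = some j → j < k ∧ pvRel rules (u.getD i "") (u.getD j "") = true := by
  intro k
  induction k with
  | zero => intro j h; exact absurd h (by simp [pvGuJ])
  | succ k ih =>
    intro j
    unfold pvGuJ
    rw [pvRelA_eq]
    by_cases h : pvRel rules (u.getD i "") (u.getD k "") = true
    · rw [if_pos h]
      intro hs
      cases Option.some_inj.mp hs
      exact ⟨Nat.lt_succ_self k, h⟩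
    · rw [if_neg h]
      intro hs
      rcases ih j hs with ⟨h1, h2⟩
      exact ⟨Nat.lt_succ_of_lt h1, h2⟩

theorem pvGuI_none (rules : List (String × List String)) (u : List String) :
    ∀ n, pvGuI rules u n = none ↔
      ∀ i, i < n → ∀ j, j < i → pvRel rules (u.getD i "") (u.getD j "") = false := by
  intro n
  induction n with
  | zero => exact ⟨fun _ i hi => absurd hi (Nat.not_lt_zero i), fun _ => rfl⟩
  | succ n ih =>
    unfold pvGuI
    cases h : pvGuJ rules u n n with
    | some j =>
      constructor
      · intro hc; exact (Option.some_ne_none _ hc).elim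
      · intro hall
        rcases pvGuJ_some rules u n n j h with ⟨h1, h2⟩
        have := hall n (Nat.lt_succ_self n) j h1
        rw [this] at h2; exact (Bool.false_ne_true h2).elim
    | none =>
      rw [ih]
      constructor
      · intro hall i hi j hj
        rcases Nat.lt_succ_iff_lt_or_eq.mp hi with h1 | rfl
        · exact hall i h1 j hj
        · exact (pvGuJ_none rules u i i).mp h j hj
      · intro hall i hi j hj; exact hall i (Nat.lt_succ_of_lt hi) j hj

theorem pvGuI_some (rules : List (String × List String)) (u : List String) :
    ∀ n i j, pvGuI rules u n = some (i, j) →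
      i < n ∧ j < i ∧ pvRel rules (u.getD i "") (u.getD j "") = true := by
  intro n
  induction n with
  | zero => intro i j h; exact absurd h (by simp [pvGuI])
  | succ n ih =>
    intro i j
    unfold pvGuI
    cases h : pvGuJ rules u n n with
    | some j' =>
      intro hs
      simp only [Option.some.injEq, Prod.mk.injEq] at hs
      obtain ⟨rfl, rfl⟩ := hs
      rcases pvGuJ_some rules u n n j' h with ⟨h1, h2⟩
      exact ⟨Nat.lt_succ_self n, h1, h2⟩
    | none =>
      intro hrec
      rcases ih i j hrec with ⟨h1, h2, h3⟩
      exact ⟨Nat.lt_succ_of_lt h1, h2, h3⟩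

theorem pvInv_append (rules : List (String × List String)) :
    ∀ xs ys : List String, pvInv rules (xs ++ ys) =
      pvInv rules xs + pvInv rules ys +
        (xs.map (fun x => ys.countP (fun b => pvRelA rules b x))).sum := by
  intro xs ys
  induction xs with
  | nil => simp [pvInv]
  | cons x t ih =>
    simp only [List.cons_append, pvInv, List.countP_append, List.map_cons, List.sum_cons, ih]
    omega

theorem pvCrossCons (rules : List (String × List String)) :
    ∀ (mid post : List String) (y : String),
      (mid.map (fun m => List.countP (fun c => pvRelA rules c m) (y :: post))).sum =
        mid.countP (fun m => pvRelA rules y m) +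
          (mid.map (fun m => post.countP (fun c => pvRelA rules c m))).sum := by
  intro mid post y
  induction mid with
  | nil => simp
  | cons m t ih =>
    rw [List.map_cons, List.sum_cons, ih, List.countP_cons, List.map_cons, List.sum_cons,
      List.countP_cons]
    by_cases h : pvRelA rules y m = true <;> simp [h] <;> omega

theorem pvMidIneq (r : String → String → Bool) :
    ∀ (mid : List String) (a b : String),
      (∀ m ∈ mid, (r m a = true → r m b = true) ∧ (r b m = true → r a m = true) ∧
        ¬(r m a = true ∧ r b m = true)) →
      mid.countP (fun c => r c a) + mid.countP (fun c => r b c) ≤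
        mid.countP (fun c => r c b) + mid.countP (fun c => r a c) := by
  intro mid a b hmid
  induction mid with
  | nil => simp
  | cons m t ih =>
    have hm := hmid m (List.mem_cons_self ..)
    have ht := ih (fun x hx => hmid x (List.mem_cons_of_mem m hx))
    rcases hm with ⟨h1, h2, h3⟩
    have key : (if r m a = true then 1 else 0) + (if r b m = true then 1 else 0) ≤
        (if r m b = true then 1 else 0) + (if r a m = true then 1 else 0) := by
      cases hma : r m a with
      | false => cases hbm : r b m with
        | false => simp
        | true => simp [h2 hbm]
      | true => cases hbm : r b m with
        | false => simp [h1 hma]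
        | true => exact absurd ⟨hma, hbm⟩ h3
    simp only [List.countP_cons]
    linarith [ht, key]

theorem pvInv_cons_shape (rules : List (String × List String)) (mid post : List String)
    (x y : String) :
    pvInv rules (x :: (mid ++ y :: post)) =
      mid.countP (fun c => pvRelA rules c x) + (if pvRelA rules y x = true then 1 else 0) +
        post.countP (fun c => pvRelA rules c x) +
        pvInv rules mid + post.countP (fun c => pvRelA rules c y) + pvInv rules post +
        mid.countP (fun m => pvRelA rules y m) +
        (mid.map (fun m => post.countP (fun c => pvRelA rules c m))).sum := by
  rw [show pvInv rules (x :: (mid ++ y :: post)) =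
    (mid ++ y :: post).countP (fun c => pvRelA rules c x) + pvInv rules (mid ++ y :: post) from rfl]
  rw [pvInv_append, pvCrossCons]
  rw [show pvInv rules (y :: post) =
    post.countP (fun c => pvRelA rules c y) + pvInv rules post from rfl]
  simp only [List.countP_append, List.countP_cons]
  by_cases h : pvRelA rules y x = true <;> simp [h] <;> omega

theorem pvPermInner (mid post : List String) (a b : String) :
    (a :: (mid ++ b :: post)).Perm (b :: (mid ++ a :: post)) := by
  exact ((List.Perm.cons a List.perm_middle).trans
    (List.Perm.swap b a (mid ++ post))).trans (List.Perm.cons b List.perm_middle.symm)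

theorem pvInvSwapLt (rules : List (String × List String)) (pre mid post : List String)
    (a b : String)
    (hab : pvRelA rules a b = true) (hba : pvRelA rules b a = false)
    (hmid : ∀ m ∈ mid, (pvRelA rules m a = true → pvRelA rules m b = true) ∧
      (pvRelA rules b m = true → pvRelA rules a m = true) ∧
      ¬(pvRelA rules m a = true ∧ pvRelA rules b m = true)) :
    pvInv rules (pre ++ a :: (mid ++ b :: post)) < pvInv rules (pre ++ b :: (mid ++ a :: post)) := by
  have hcross : (fun x => (a :: (mid ++ b :: post)).countP (fun c => pvRelA rules c x)) =
      (fun x => (b :: (mid ++ a :: post)).countP (fun c => pvRelA rules c x)) :=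
    funext fun x => (pvPermInner mid post a b).countP_eq _
  rw [pvInv_append, pvInv_append, hcross]
  have hin : pvInv rules (a :: (mid ++ b :: post)) < pvInv rules (b :: (mid ++ a :: post)) := by
    rw [pvInv_cons_shape, pvInv_cons_shape, hab, hba]
    norm_num
    have := pvMidIneq (pvRelA rules) mid a b hmid
    omega
  omega

theorem pvGetD_append_len (p rest : List String) (x : String) :
    (p ++ x :: rest).getD p.length "" = x := by
  simp [List.getD]

theorem pvSet_append_len (p rest : List String) (x v : String) :
    (p ++ x :: rest).set p.length v = p ++ v :: rest := by
  simp

theorem pvDecomp (u : List String) (i j : Nat) (hj : j < i) (hi : i < u.length) :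
    u = u.take j ++ u.getD j "" ::
      ((u.drop (j + 1)).take (i - j - 1) ++ u.getD i "" :: u.drop (i + 1)) := by
  have hjl : j < u.length := lt_trans hj hi
  rw [List.getD_eq_getElem u "" hjl, List.getD_eq_getElem u "" hi]
  conv_lhs => rw [← List.take_append_drop j u]
  congr 1
  rw [List.drop_eq_getElem_cons hjl]
  congr 1
  conv_lhs => rw [← List.take_append_drop (i - j - 1) (u.drop (j + 1))]
  congr 1
  rw [List.drop_drop]
  have he : j + 1 + (i - j - 1) = i := by omega
  rw [he]
  exact List.drop_eq_getElem_cons hi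

theorem pvSwap_shape (pre mid post : List String) (b a : String) :
    pvSwap (pre ++ b :: (mid ++ a :: post)) (pre.length + 1 + mid.length) pre.length =
      pre ++ a :: (mid ++ b :: post) := by
  unfold pvSwap
  have e : pre ++ b :: (mid ++ a :: post) = (pre ++ b :: mid) ++ a :: post := by simp
  have hl : pre.length + 1 + mid.length = (pre ++ b :: mid).length := by simp; omega
  have h1 : (pre ++ b :: (mid ++ a :: post)).getD pre.length "" = b := pvGetD_append_len ..
  have h2 : (pre ++ b :: (mid ++ a :: post)).getD (pre.length + 1 + mid.length) "" = a := by
    rw [e, hl]; exact pvGetD_append_len ..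
  rw [h1, h2, e, hl, pvSet_append_len]
  have e2 : (pre ++ b :: mid) ++ b :: post = pre ++ b :: (mid ++ b :: post) := by simp
  rw [e2, pvSet_append_len]

theorem pvFixLoop_spec (rules : List (String × List String)) (u0 : List String)
    (hlin : pvLinearUpd rules u0) :
    ∀ n : Nat, ∀ u : List String, ∀ i j : Nat, pvInv rules u = n → u.Perm u0 →
      getUnorder u rules = some (i, j) →
      (pvFixLoop rules u i j).Perm u0 ∧
        getUnorder (pvFixLoop rules u i j) rules = none := by
  intro n
  induction n using Nat.strong_induction_on with
  | _ n IH =>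
  intro u i j hn hperm hgu
  obtain ⟨hnodup, hparse, hirr, htot, htrans⟩ := hlin
  rcases pvGuI_some rules u u.length i j hgu with ⟨hi, hj, hviol⟩
  have hjl : j < u.length := lt_trans hj hi
  set b := u.getD j "" with hbdef
  set a := u.getD i "" with hadef
  set pre := u.take j with hpredef
  set mid := (u.drop (j + 1)).take (i - j - 1) with hmiddef
  set post := u.drop (i + 1) with hpostdef
  have hdec : u = pre ++ b :: (mid ++ a :: post) := pvDecomp u i j hj hi
  have hlenpre : pre.length = j := by
    rw [hpredef, List.length_take]; omega
  have hlenmid : mid.length = i - j - 1 := by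
    rw [hmiddef, List.length_take, List.length_drop]; omega
  have hidx : i = pre.length + 1 + mid.length := by omega
  have hmem : ∀ x ∈ u, x ∈ u0 := fun x hx => hperm.mem_iff.mp hx
  have hau : a ∈ u := by rw [hdec]; simp
  have hbu : b ∈ u := by rw [hdec]; simp
  have ha0 : a ∈ u0 := hmem a hau
  have hb0 : b ∈ u0 := hmem b hbu
  have hab : pvRelA rules a b = true := by rw [pvRelA_eq]; exact hviol
  have hne : a ≠ b := by
    intro h
    rw [h] at hviol
    rw [hirr b hb0] at hviol
    exact Bool.false_ne_true hviol
  have hba : pvRelA rules b a = false := by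
    rw [pvRelA_eq, htot b hb0 a ha0 (Ne.symm hne), hviol]
    rfl
  have hmidcond : ∀ m ∈ mid, (pvRelA rules m a = true → pvRelA rules m b = true) ∧
      (pvRelA rules b m = true → pvRelA rules a m = true) ∧
      ¬(pvRelA rules m a = true ∧ pvRelA rules b m = true) := by
    intro m hm
    have hmu : m ∈ u := by rw [hdec]; simp [hm]
    have hm0 : m ∈ u0 := hmem m hmu
    refine ⟨?_, ?_, ?_⟩
    · intro h
      rw [pvRelA_eq] at h ⊢
      exact htrans m hm0 a ha0 b hb0 h hviol
    · intro h
      rw [pvRelA_eq] at h ⊢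
      exact htrans a ha0 b hb0 m hm0 hviol h
    · rintro ⟨h1, h2⟩
      rw [pvRelA_eq] at h1 h2
      have hcontr := htrans b hb0 m hm0 a ha0 h2 h1
      rw [pvRelA_eq] at hba
      rw [hba] at hcontr
      exact Bool.false_ne_true hcontr
  have hswap : pvSwap u i j = pre ++ a :: (mid ++ b :: post) := by
    conv_lhs => rw [hdec]
    rw [show i = pre.length + 1 + mid.length from hidx,
        show j = pre.length from hlenpre.symm]
    exact pvSwap_shape pre mid post b a
  have hperm' : (pvSwap u i j).Perm u0 := by
    rw [hswap]
    exact (List.Perm.append_left pre (pvPermInner mid post a b)).trans (hdec ▸ hperm)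
  have hlt : pvInv rules (pvSwap u i j) < pvInv rules u := by
    rw [hswap]; conv_rhs => rw [hdec]
    exact pvInvSwapLt rules pre mid post a b hab hba hmidcond
  rw [pvFixLoop]
  split
  next heq => exact ⟨hperm', heq⟩
  next i' j' heq =>
    rw [dif_pos hlt]
    exact IH (pvInv rules (pvSwap u i j)) (hn ▸ hlt) (pvSwap u i j) i' j' rfl hperm' heq

theorem pvSorted_pairwise (rules : List (String × List String)) (u0 g : List String)
    (hnodup0 : u0.Nodup)
    (htot : ∀ x ∈ u0, ∀ y ∈ u0, x ≠ y → pvRel rules x y = !pvRel rules y x)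
    (hperm : g.Perm u0)
    (hgood : ∀ i, i < g.length → ∀ j, j < i → pvRel rules (g.getD i "") (g.getD j "") = false) :
    List.Pairwise (fun x y => pvRel rules x y = true ∧ pvRel rules y x = false ∧ x ≠ y) g := by
  have hnodup : g.Nodup := (hperm.nodup_iff).mpr hnodup0
  rw [List.pairwise_iff_getElem]
  intro p q hp hq hpq
  have hne : g[p] ≠ g[q] := by
    intro h
    exact absurd (hnodup.getElem_inj_iff.mp h) (Nat.ne_of_lt hpq)
  have hqp := hgood q hq p hpq
  rw [List.getD_eq_getElem g "" hq, List.getD_eq_getElem g "" hp] at hqp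
  have hp0 : g[p] ∈ u0 := hperm.mem_iff.mp (List.getElem_mem hp)
  have hq0 : g[q] ∈ u0 := hperm.mem_iff.mp (List.getElem_mem hq)
  have h1 : pvRel rules g[p] g[q] = true := by
    rw [htot g[p] hp0 g[q] hq0 hne, hqp]; rfl
  exact ⟨h1, hqp, hne⟩

theorem pvAfterCount (rules : List (String × List String)) (g : List String)
    (hpair : List.Pairwise (fun x y => pvRel rules x y = true ∧ pvRel rules y x = false ∧ x ≠ y) g)
    (k : Nat) (hk : k < g.length) :
    g.countP (fun y => decide (y ≠ g[k]) && pvRel rules g[k] y) = g.length - 1 - k := by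
  have hdec : g = g.take k ++ g[k] :: g.drop (k + 1) := by
    conv_lhs => rw [← List.take_append_drop k g]
    rw [List.drop_eq_getElem_cons hk]
  set x := g[k] with hx
  rw [hdec, List.pairwise_append, List.pairwise_cons] at hpair
  obtain ⟨_, ⟨hxd, _⟩, hAB⟩ := hpair
  conv_lhs => rw [hdec]
  rw [List.countP_append, List.countP_cons]
  have hc1 : (g.take k).countP (fun y => decide (y ≠ x) && pvRel rules x y) = 0 := by
    rw [List.countP_eq_zero]
    intro y hy
    obtain ⟨_, hxy, _⟩ := hAB y hy x (List.mem_cons_self ..)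
    simp [hxy]
  have hc2 : (g.drop (k + 1)).countP (fun y => decide (y ≠ x) && pvRel rules x y) =
      (g.drop (k + 1)).length := by
    rw [List.countP_eq_length]
    intro y hy
    obtain ⟨hxy, _, hne⟩ := hxd y hy
    simp [hxy, Ne.symm hne]
  rw [hc1, hc2]
  have hxx : (decide (x ≠ x) && pvRel rules x x) = false := by simp
  rw [hxx]
  simp only [List.length_drop]
  simp
  omega

theorem pvFindUnique (p : String → Bool) :
    ∀ (l : List String) (x : String), x ∈ l → p x = true →
      (∀ y ∈ l, p y = true → y = x) → l.find? p = some x := by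
  intro l
  induction l with
  | nil => intro x hx; exact absurd hx (List.not_mem_nil)
  | cons h t ih =>
    intro x hx hpx huniq
    by_cases hph : p h = true
    · rw [List.find?_cons_of_pos hph, huniq h (List.mem_cons_self ..) hph]
    · have hph' : p h = false := by revert hph; cases p h <;> simp
      rw [List.find?_cons_of_neg (by simp [hph'])]
      have hxh : x ≠ h := fun he => by rw [he, hph'] at hpx; exact Bool.false_ne_true hpx
      have hxt : x ∈ t := by
        rcases List.mem_cons.mp hx with he | ht
        · exact absurd he hxh
        · exact ht
      exact ih x hxt hpx (fun y hy hpy => huniq y (List.mem_cons_of_mem h hy) hpy)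

theorem pvOrdered_iff (rules : List (String × List String)) (u : List String) :
    (((List.range u.length).all fun i => (List.range i).all fun j =>
      !(((PySem.Dict.mk rules).getD (u.getD i "") []).contains (u.getD j ""))) = true) ↔
      getUnorder u rules = none := by
  unfold getUnorder
  rw [pvGuI_none]
  constructor
  · intro hall i hi j hj
    have := List.all_eq_true.mp (List.all_eq_true.mp hall i (List.mem_range.mpr hi)) j
      (List.mem_range.mpr hj)
    rw [Bool.not_eq_eq_eq_not] at this
    rw [← pvRelB_eq]
    simpa using this
  · intro hall
    rw [List.all_eq_true]
    intro i hi
    rw [List.all_eq_true]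
    intro j hj
    have := hall i (List.mem_range.mp hi) j (List.mem_range.mp hj)
    rw [← pvRelB_eq] at this
    simpa using this

theorem pvOrderedUpd_iff (rules : List (String × List String)) (u : List String) :
    pvOrderedUpd rules u ↔ getUnorder u rules = none := by
  unfold getUnorder
  rw [pvGuI_none, pvOrderedUpd, List.pairwise_iff_getElem]
  constructor
  · intro hpw i hi j hj
    rw [List.getD_eq_getElem u "" hi, List.getD_eq_getElem u "" (lt_trans hj hi)]
    exact hpw j i (lt_trans hj hi) hi hj
  · intro hall p q hp hq hpq
    have := hall q hq p hpq
    rw [List.getD_eq_getElem u "" hq, List.getD_eq_getElem u "" hp] at this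
    exact this

theorem pvStepB_ordered (rules : List (String × List String)) (u : List String)
    (h : getUnorder u rules = none) (acc : Int) : pvStepB rules acc u = acc := by
  unfold pvStepB
  rw [if_pos ((pvOrdered_iff rules u).mpr h)]

theorem pvStep_eq (rules : List (String × List String)) (u : List String)
    (hpre : pvOrderedUpd rules u ∨ pvLinearUpd rules u) (acc : Int) :
    pvStepA rules acc u = pvStepB rules acc u := by
  cases hgu : getUnorder u rules with
  | none =>
    rw [pvStepB_ordered rules u hgu acc]
    unfold pvStepA
    rw [hgu]
  | some p =>
    obtain ⟨i, j⟩ := p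
    have hlin : pvLinearUpd rules u := by
      rcases hpre with ho | hl
      · rw [(pvOrderedUpd_iff rules u).mp ho] at hgu; exact absurd hgu (by simp)
      · exact hl
    obtain ⟨hperm, hgnone⟩ := pvFixLoop_spec rules u hlin (pvInv rules u) u i j rfl
      (List.Perm.refl u) hgu
    obtain ⟨hnodup, hparse, hirr, htot, htrans⟩ := hlin
    rcases pvGuI_some rules u u.length i j hgu with ⟨hi, hj, _⟩
    set g := pvFixLoop rules u i j with hg
    have hlen : g.length = u.length := hperm.length_eq
    have hnpos : 0 < u.length := lt_of_le_of_lt (Nat.zero_le i) hi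
    have hk : g.length / 2 < g.length := Nat.div_lt_self (by omega) (by omega)
    have hgood : ∀ a, a < g.length → ∀ b, b < a →
        pvRel rules (g.getD a "") (g.getD b "") = false :=
      (pvGuI_none rules g g.length).mp hgnone
    have hpair := pvSorted_pairwise rules u g hnodup htot hperm hgood
    set k := g.length / 2 with hkdef
    have hcnt := pvAfterCount rules g hpair k hk
    have hmidmem : g[k] ∈ u := hperm.mem_iff.mp (List.getElem_mem hk)
    -- the A-side value
    have hA : pvStepA rules acc u = acc + (PySem.Int.ofStr? g[k]).getD 0 := by
      unfold pvStepA
      rw [hgu]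
      show acc + (PySem.Int.ofStr? ((pvFixLoop rules u i j).getD
        ((pvFixLoop rules u i j).length / 2) "")).getD 0 = acc + (PySem.Int.ofStr? g[k]).getD 0
      rw [← hg, ← hkdef, List.getD_eq_getElem g "" hk]
    -- the B-side value
    have hordF : ((List.range u.length).all fun a => (List.range a).all fun b =>
        !(((PySem.Dict.mk rules).getD (u.getD a "") []).contains (u.getD b ""))) = false := by
      cases hcase : ((List.range u.length).all fun a => (List.range a).all fun b =>
        !(((PySem.Dict.mk rules).getD (u.getD a "") []).contains (u.getD b ""))) with
      | true =>
        rw [(pvOrdered_iff rules u).mp hcase] at hgu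
        exact absurd hgu (by simp)
      | false => rfl
    have hfind : u.find? (fun x =>
        u.countP (fun y => decide (y ≠ x) &&
          (match (PySem.Dict.mk rules).get? x with
           | some s => List.contains s y
           | none => false)) == u.length - 1 - u.length / 2) = some g[k] := by
      apply pvFindUnique _ u g[k] hmidmem
      · show (u.countP (fun y => decide (y ≠ g[k]) && pvRel rules g[k] y) ==
          u.length - 1 - u.length / 2) = true
        rw [← hperm.countP_eq, hcnt, beq_iff_eq, hkdef, hlen]
      · intro y hy hpy
        have hyg : y ∈ g := hperm.mem_iff.mpr hy
        obtain ⟨p, hp, rfl⟩ := List.mem_iff_getElem.mp hyg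
        have hpy' : (u.countP (fun z => decide (z ≠ g[p]) && pvRel rules g[p] z) ==
            u.length - 1 - u.length / 2) = true := hpy
        rw [← hperm.countP_eq, pvAfterCount rules g hpair p hp, beq_iff_eq, hlen] at hpy'
        have : p = k := by
          rw [← hlen] at hpy'
          omega
        subst this
        rfl
    have hB : pvStepB rules acc u = acc + (PySem.Int.ofStr? g[k]).getD 0 := by
      unfold pvStepB
      rw [hordF]
      simp only [Bool.false_eq_true, if_false]
      rw [hfind]
    rw [hA, hB]

theorem pvFold_eq (rules : List (String × List String)) :
    ∀ (l : List (List String)) (acc : Int),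
      (∀ u ∈ l, pvOrderedUpd rules u ∨ pvLinearUpd rules u) →
      l.foldl (pvStepA rules) acc = l.foldl (pvStepB rules) acc := by
  intro l
  induction l with
  | nil => intro acc _; rfl
  | cons u t ih =>
    intro acc hl
    rw [List.foldl_cons, List.foldl_cons, pvStep_eq rules u (hl u (List.mem_cons_self ..)) acc]
    exact ih _ (fun v hv => hl v (List.mem_cons_of_mem u hv))

-- ===== VERDICT (by name: the statement is the Claim_ definition above) =====
theorem solve_spec : Claim_equal_solve := by
  intro rules updates _hdom hpre
  unfold Spec_solve solve solve_alt
  exact pvFold_eq rules updates 0 hpre
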